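-- pv_equiv track=rewrite | github.com/trevor91/algorithm | naver/1.py | solution
-- ===== SOURCE A (Python) =====
-- def calc(a,b):
-- 	if a + b == 7:
-- 		return 2
-- 	return 1
--
-- def solution(A):
--     rst = 0
--     for i in range(len(A)):
--     	temp = 0
--     	standard  = A[i]
--     	for j in range(len(A)):
--     		if standard == A[j]:
--     			continue
--     		else:
--     			temp += calc(standard,A[j])
--     	if rst > temp or rst == 0:
--     		rst = temp
--     return rst
-- ===== SOURCE B (Python) =====
-- def solution(A):
--     cnt = {}
--     for a in A:
--         cnt[a] = cnt.get(a, 0) + 1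
--     if len(cnt) <= 1:
--         return 0
--     n = len(A)
--     best = None
--     for v, c in cnt.items():
--         t = (n - c) + cnt.get(7 - v, 0)
--         if best is None or t < best:
--             best = t
--     return best
-- ===== Notes on version B (the rewrite author's own statement) =====
-- stated objective: faster
-- what changed: A's nested all-pairs scan (for each element, rescan the whole list) is replaced by one frequency dictionary built in a single pass; each candidate's weighted difference count is then computed in O(1) from the counts of its value and of 7-value, taking the minimum over distinct values only.
import Mathlib
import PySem

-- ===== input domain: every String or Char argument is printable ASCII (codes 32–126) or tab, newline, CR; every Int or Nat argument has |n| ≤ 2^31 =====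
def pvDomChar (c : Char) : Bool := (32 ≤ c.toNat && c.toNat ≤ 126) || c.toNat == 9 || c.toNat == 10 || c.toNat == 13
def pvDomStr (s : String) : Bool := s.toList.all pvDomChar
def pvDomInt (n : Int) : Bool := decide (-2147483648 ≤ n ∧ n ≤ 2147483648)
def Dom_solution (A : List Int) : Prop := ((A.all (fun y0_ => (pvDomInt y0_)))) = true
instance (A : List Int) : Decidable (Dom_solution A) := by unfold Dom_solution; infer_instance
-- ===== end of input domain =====

-- B replaces A's quadratic all-pairs scan by one frequency dictionary: each candidate's
-- weighted difference count is computed in O(1) from the counts of its value and of 7-value.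

-- ===== PORT A =====
def pvCalc (a b : Int) : Int := if a + b == 7 then 2 else 1

-- inner loop of A: temp accumulated over all j with A[j] ≠ standard
def pvTemp (A : List Int) (standard : Int) : Int :=
  A.foldl (fun temp aj => if standard == aj then temp else temp + pvCalc standard aj) 0

def solution (A : List Int) : Int :=
  A.foldl (fun rst standard =>
    let temp := pvTemp A standard
    if rst > temp ∨ rst = 0 then temp else rst) 0

-- ===== PORT B =====
-- 'if best is None or t < best: best = t'
def pvStep (best : Option Int) (t : Int) : Option Int :=
  match best with
  | none => some t
  | some b => if t < b then some t else some b

def solution_alt (A : List Int) : Int :=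
  let cnt : PySem.Dict Int Int :=
    A.foldl (fun d a => d.insert a (d.getD a 0 + 1)) PySem.Dict.empty
  if cnt.size ≤ 1 then 0
  else
    let n : Int := A.length
    (cnt.items.foldl (fun best vc =>
        pvStep best ((n - vc.2) + cnt.getD (7 - vc.1) 0)) none).getD 0

-- ===== PRECONDITION & SPEC =====
def Spec_solution (A : List Int) (out : Int) : Prop := out = solution_alt A
instance (A : List Int) (out : Int) : Decidable (Spec_solution A out) := by unfold Spec_solution; infer_instance

-- ===== CLAIM (what is proved, stated in full; the proofs are below) =====
def Claim_equal_solution : Prop := ∀ (A : List Int), Dom_solution A → Spec_solution A (solution A)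

-- ===== LEMMAS AND PROOFS =====

-- the value both programs compute per candidate v
def pvG (A : List Int) (v : Int) : Int :=
  (A.length : Int) - A.count v + A.count (7 - v)

lemma temp_gen (v : Int) (l : List Int) : ∀ (t : Int),
    l.foldl (fun temp aj => if v == aj then temp else temp + pvCalc v aj) t
      = t + ((l.length : Int) - l.count v + l.count (7 - v)) := by
  induction l with
  | nil => intro t; simp
  | cons a l ih =>
    intro t
    rw [List.foldl_cons, ih]
    simp only [List.count_cons, List.length_cons, pvCalc, beq_iff_eq]
    by_cases h1 : v = a
    · subst h1
      have h2 : ¬ (v = 7 - v) := by omega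
      simp only [if_neg h2]
      push_cast; omega
    · have h5 : ¬ a = v := fun h => h1 h.symm
      by_cases h3 : v + a = 7
      · have h4 : a = 7 - v := by omega
        simp only [if_neg h1, if_pos h3, if_neg h5, if_pos h4]
        push_cast; omega
      · have h4 : ¬ a = 7 - v := by omega
        simp only [if_neg h1, if_neg h3, if_neg h5, if_neg h4]
        push_cast; omega

lemma temp_eq (A : List Int) (v : Int) : pvTemp A v = pvG A v := by
  simpa [pvTemp, pvG] using temp_gen v A 0

-- A's accumulator over a list of positive temps is the minimum
lemma qfold_spec : ∀ (ts : List Int), (∀ t ∈ ts, 1 ≤ t) → ∀ r : Int, 1 ≤ r →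
    (ts.foldl (fun rst temp => if rst > temp ∨ rst = 0 then temp else rst) r ∈ r :: ts
     ∧ ∀ x ∈ r :: ts, ts.foldl (fun rst temp => if rst > temp ∨ rst = 0 then temp else rst) r ≤ x) := by
  intro ts
  induction ts with
  | nil => intro _ r _; simp
  | cons t ts ih =>
    intro h r hr
    have ht : 1 ≤ t := h t (by simp)
    have hts : ∀ x ∈ ts, 1 ≤ x := fun x hx => h x (by simp [hx])
    simp only [List.foldl_cons]
    have hr1 : 1 ≤ (if r > t ∨ r = 0 then t else r) := by split_ifs <;> omega
    obtain ⟨hmem, hle⟩ := ih hts _ hr1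
    constructor
    · rcases List.mem_cons.mp hmem with hc | hc
      · rw [hc]; split_ifs <;> simp
      · simp [hc]
    · intro x hx
      rcases List.mem_cons.mp hx with hc | hc
      · subst hc
        have := hle _ (List.mem_cons_self)
        split_ifs at this ⊢ <;> omega
      · rcases List.mem_cons.mp hc with hc | hc
        · subst hc
          have := hle _ (List.mem_cons_self)
          split_ifs at this ⊢ <;> omega
        · exact hle x (by simp [hc])

lemma qfold_zero : ∀ (ts : List Int), (∀ t ∈ ts, t = 0) →
    ts.foldl (fun rst temp => if rst > temp ∨ rst = 0 then temp else rst) 0 = 0 := by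
  intro ts
  induction ts with
  | nil => intro _; rfl
  | cons t ts ih =>
    intro h
    have ht : t = 0 := h t (by simp)
    simp only [List.foldl_cons, ht]
    exact ih (fun x hx => h x (by simp [hx]))

-- B's accumulator is the minimum as well
lemma ofold_spec : ∀ (ts : List Int) (b : Int),
    ∃ m, ts.foldl pvStep (some b) = some m ∧ m ∈ b :: ts ∧ ∀ x ∈ b :: ts, m ≤ x := by
  intro ts
  induction ts with
  | nil => intro b; exact ⟨b, rfl, by simp, by simp⟩
  | cons t ts ih =>
    intro b
    have hstep : pvStep (some b) t = some (if t < b then t else b) := by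
      simp only [pvStep]; split_ifs <;> rfl
    rw [List.foldl_cons, hstep]
    obtain ⟨m, hm, hmem, hle⟩ := ih (if t < b then t else b)
    refine ⟨m, hm, ?_, ?_⟩
    · rcases List.mem_cons.mp hmem with hc | hc
      · rw [hc]; split_ifs <;> simp
      · simp [hc]
    · intro x hx
      rcases List.mem_cons.mp hx with hc | hc
      · subst hc
        have := hle _ (List.mem_cons_self)
        split_ifs at this ⊢ <;> omega
      · rcases List.mem_cons.mp hc with hc | hc
        · subst hc
          have := hle _ (List.mem_cons_self)
          split_ifs at this ⊢ <;> omega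
        · exact hle x (by simp [hc])

-- A's fold rewritten as a fold over the mapped temps
lemma solution_eq_fold (A : List Int) :
    solution A = (A.map (pvG A)).foldl
      (fun rst temp => if rst > temp ∨ rst = 0 then temp else rst) 0 := by
  simp only [solution, List.foldl_map, temp_eq]

-- B's fold rewritten as a fold over the mapped temps of the distinct values
lemma solution_alt_eq (A : List Int) :
    solution_alt A =
      if (PySem.Set.ofList A).length ≤ 1 then 0
      else (((PySem.Set.ofList A).map (pvG A)).foldl pvStep none).getD 0 := by
  simp only [solution_alt, PySem.Dict.foldl_insert_getD_add_one_eq_counter]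
  have hgd : ∀ k, (PySem.Dict.counter A).getD k 0 = (A.count k : Int) := by
    intro k
    rw [← PySem.Dict.foldl_insert_getD_add_one_eq_counter,
      PySem.Dict.getD_foldl_insert_add_one]
    simp [PySem.Dict.empty, PySem.Dict.getD, PySem.Dict.get?]
  have hsize : (PySem.Dict.counter A).size = (PySem.Set.ofList A).length := by
    simp [PySem.Dict.size, PySem.Dict.items_counter]
  rw [hsize]
  congr 1
  rw [PySem.Dict.items_counter]
  simp only [List.foldl_map]
  have hfun : (fun (x : Option Int) (y : Int) =>
      pvStep x ((A.length : Int) - (A.count y : Int) + (PySem.Dict.counter A).getD (7 - y) 0))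
      = fun x y => pvStep x (pvG A y) := by
    funext x y
    rw [hgd]
    simp only [pvG]
  rw [hfun]

theorem solution_spec : Claim_equal_solution := by
  intro A _
  unfold Spec_solution
  rw [solution_eq_fold, solution_alt_eq]
  by_cases hk : (PySem.Set.ofList A).length ≤ 1
  · rw [if_pos hk]
    -- at most one distinct value: every temp is 0
    apply qfold_zero
    intro t ht
    obtain ⟨s, hs, rfl⟩ := List.mem_map.mp ht
    have hall : ∀ x ∈ A, x = s := by
      intro x hx
      have hxK : x ∈ PySem.Set.ofList A := (PySem.Set.mem_ofList A x).mpr hx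
      have hsK : s ∈ PySem.Set.ofList A := (PySem.Set.mem_ofList A s).mpr hs
      match hK : PySem.Set.ofList A with
      | [] => rw [hK] at hxK; simp at hxK
      | [u] =>
        rw [hK] at hxK hsK; simp at hxK hsK; omega
      | u :: w :: rest => rw [hK] at hk; simp at hk
    have hcv : A.count s = A.length := List.count_eq_length.mpr (fun b hb => (hall b hb).symm)
    have h7 : A.count (7 - s) = 0 := by
      rw [List.count_eq_zero]
      intro hmem
      have := hall _ hmem
      omega
    simp [pvG, hcv, h7]
  · rw [if_neg hk]
    -- at least two distinct values: every temp is ≥ 1, both sides are the min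
    have h2 : 2 ≤ (PySem.Set.ofList A).length := by omega
    obtain ⟨u, w, hu, hw, huw⟩ : ∃ u w, u ∈ A ∧ w ∈ A ∧ u ≠ w := by
      cases hK : PySem.Set.ofList A with
      | nil => rw [hK] at h2; simp at h2
      | cons u K1 =>
        cases K1 with
        | nil => rw [hK] at h2; simp at h2
        | cons w K2 =>
          have hnd := PySem.Set.nodup_ofList A
          rw [hK] at hnd
          refine ⟨u, w, (PySem.Set.mem_ofList A u).mp (by rw [hK]; simp),
            (PySem.Set.mem_ofList A w).mp (by rw [hK]; simp), ?_⟩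
          intro h; subst h; simp at hnd
    have hpos : ∀ s ∈ A, 1 ≤ pvG A s := by
      intro s hs
      have hlt : A.count s < A.length := by
        rcases Nat.lt_or_ge (A.count s) A.length with h | h
        · exact h
        · exfalso
          have heq : A.count s = A.length := le_antisymm (List.count_le_length) h
          have := List.count_eq_length.mp heq
          exact huw ((this u hu).symm.trans (this w hw))
      have hc7 : 0 ≤ (A.count (7 - s) : Int) := Int.natCast_nonneg _
      simp only [pvG]; omega
    obtain ⟨a0, A', hA⟩ := List.exists_cons_of_ne_nil (List.ne_nil_of_mem hu)
    subst hA
    obtain ⟨k0, K', hKl⟩ := List.exists_cons_of_ne_nil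
      (show PySem.Set.ofList (a0 :: A') ≠ [] by
        intro h; rw [h] at h2; simp at h2)
    -- A side
    have hApos : ∀ t ∈ A'.map (pvG (a0 :: A')), 1 ≤ t := by
      intro t ht
      obtain ⟨s, hs, rfl⟩ := List.mem_map.mp ht
      exact hpos s (by simp [hs])
    have h0a : 1 ≤ pvG (a0 :: A') a0 := hpos a0 (by simp)
    obtain ⟨haMem, haLe⟩ := qfold_spec (A'.map (pvG (a0 :: A'))) hApos _ h0a
    -- B side
    obtain ⟨m, hm, hmmem, hmle⟩ := ofold_spec (K'.map (pvG (a0 :: A'))) (pvG (a0 :: A') k0)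
    -- rewrite both folds into the peeled forms
    rw [hKl]
    simp only [List.map_cons, List.foldl_cons]
    rw [show (if (0:Int) > pvG (a0 :: A') a0 ∨ True then pvG (a0 :: A') a0 else 0)
        = pvG (a0 :: A') a0 from by simp]
    have hstepn : pvStep none (pvG (a0 :: A') k0) = some (pvG (a0 :: A') k0) := rfl
    rw [hstepn, hm, Option.getD_some]
    -- both sides are the minimum of pvG over the elements of a0 :: A'
    have hrA : ∃ s ∈ (a0 :: A'),
        (A'.map (pvG (a0 :: A'))).foldl
          (fun rst temp => if rst > temp ∨ rst = 0 then temp else rst)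
          (pvG (a0 :: A') a0) = pvG (a0 :: A') s := by
      rcases List.mem_cons.mp haMem with hc | hc
      · exact ⟨a0, by simp, hc⟩
      · obtain ⟨s, hs, hsg⟩ := List.mem_map.mp hc
        exact ⟨s, by simp [hs], hsg.symm⟩
    have hmB : ∃ k ∈ PySem.Set.ofList (a0 :: A'), m = pvG (a0 :: A') k := by
      rcases List.mem_cons.mp hmmem with hc | hc
      · exact ⟨k0, by rw [hKl]; simp, hc⟩
      · obtain ⟨k, hkm, hkg⟩ := List.mem_map.mp hc
        exact ⟨k, by rw [hKl]; simp [hkm], hkg.symm⟩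
    obtain ⟨s, hsA, hrs⟩ := hrA
    obtain ⟨k, hkK, hmk⟩ := hmB
    have hle1 : (A'.map (pvG (a0 :: A'))).foldl
        (fun rst temp => if rst > temp ∨ rst = 0 then temp else rst)
        (pvG (a0 :: A') a0) ≤ m := by
      have hkA : k ∈ (a0 :: A') := (PySem.Set.mem_ofList _ k).mp hkK
      rcases List.mem_cons.mp hkA with hc | hc
      · rw [hmk, hc]; exact haLe _ List.mem_cons_self
      · rw [hmk]
        exact haLe _ (List.mem_cons.mpr (Or.inr (List.mem_map_of_mem hc)))
    have hle2 : m ≤ (A'.map (pvG (a0 :: A'))).foldl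
        (fun rst temp => if rst > temp ∨ rst = 0 then temp else rst)
        (pvG (a0 :: A') a0) := by
      have hsK : s ∈ PySem.Set.ofList (a0 :: A') := (PySem.Set.mem_ofList _ s).mpr hsA
      rw [hKl] at hsK
      rcases List.mem_cons.mp hsK with hc | hc
      · rw [hrs, hc]; exact hmle _ List.mem_cons_self
      · rw [hrs]
        exact hmle _ (List.mem_cons.mpr (Or.inr (List.mem_map_of_mem hc)))
    omega
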